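-- pv_equiv track=rewrite | github.com/dmitrijsrutko/advent-of-code | 2025/AoC_2025/Day06/Day06.py | solve_01
-- ===== SOURCE A (Python) =====
-- def solve_01(numbers: list[list[int]], ops: list[str]) -> int:
--
--     total = 0
--     for c in range(len(ops)):
--         if (ops[c] == '+'):
--             # addition
--             sum = 0
--             for r in range(len(numbers)):
--                 sum += numbers[r][c]
--
--             total += sum
--             pass
--         elif (ops[c] == '*'):
--             # multiplication
--             mult = 1
--             for r in range(len(numbers)):
--                 mult *= numbers[r][c]
--
--             total += mult
--             pass
--         else:
--             raise ValueError(f"Unknown operation: {ops[c]}")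
--
--     return total
-- ===== SOURCE B (Python) =====
-- def solve_01(numbers: list[list[int]], ops: list[str]) -> int:
--     acc = []
--     for op in ops:
--         if op == '+':
--             acc.append(0)
--         elif op == '*':
--             acc.append(1)
--         else:
--             raise ValueError(f"Unknown operation: {op}")
--     for row in numbers:
--         acc = [a + x if op == '+' else a * x
--                for a, op, x in zip(acc, ops, row)]
--     return sum(acc)
-- ===== Notes on version B (the rewrite author's own statement) =====
-- stated objective: alternative
-- what changed: Loop interchange: instead of fully reducing each column with an inner row scan, B validates ops once into a per-column accumulator array (0 for '+', 1 for '*') and makes a single row-major pass updating all column accumulators, then sums them.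
import Mathlib
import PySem

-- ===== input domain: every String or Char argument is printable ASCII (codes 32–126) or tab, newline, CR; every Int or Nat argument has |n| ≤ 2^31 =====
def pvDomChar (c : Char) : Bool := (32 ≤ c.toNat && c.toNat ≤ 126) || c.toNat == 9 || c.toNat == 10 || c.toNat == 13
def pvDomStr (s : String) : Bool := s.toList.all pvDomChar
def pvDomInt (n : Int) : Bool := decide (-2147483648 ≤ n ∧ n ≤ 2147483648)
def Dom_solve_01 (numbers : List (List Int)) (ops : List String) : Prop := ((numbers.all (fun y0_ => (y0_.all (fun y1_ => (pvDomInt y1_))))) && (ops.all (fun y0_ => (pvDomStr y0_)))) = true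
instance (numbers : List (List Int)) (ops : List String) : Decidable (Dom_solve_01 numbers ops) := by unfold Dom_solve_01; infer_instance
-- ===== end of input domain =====

-- B interchanges the two loops: one row-major pass over per-column accumulators instead of
-- a full inner row scan per column (same cost, different decomposition).

-- ===== PORT A =====
-- literal port of A; the 'raise ValueError' branch (excluded by Pre_) leaves total unchanged
def solve_01 (numbers : List (List Int)) (ops : List String) : Int :=
  (PySem.List.pyRange 0 (ops.length : Int) 1).foldl (fun total c =>
    if PySem.List.pyGetD ops c "" == "+" then
      total + (PySem.List.pyRange 0 (numbers.length : Int) 1).foldl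
        (fun s r => s + PySem.List.pyGetD (PySem.List.pyGetD numbers r []) c 0) 0
    else if PySem.List.pyGetD ops c "" == "*" then
      total + (PySem.List.pyRange 0 (numbers.length : Int) 1).foldl
        (fun m r => m * PySem.List.pyGetD (PySem.List.pyGetD numbers r []) c 0) 1
    else total) 0

-- ===== PORT B =====
-- literal port of Source B; the 'raise ValueError' branch (excluded by Pre_) appends 1
def solve_01_alt (numbers : List (List Int)) (ops : List String) : Int :=
  let acc0 := ops.foldl (fun acc op => acc ++ [if op == "+" then (0 : Int) else 1]) []
  let accN := numbers.foldl (fun acc row =>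
    (acc.zip (ops.zip row)).map
      (fun p => if p.2.1 == "+" then p.1 + p.2.2 else p.1 * p.2.2)) acc0
  accN.sum

-- ===== PRECONDITION & SPEC =====
-- Pre_ excludes exactly the inputs where A raises: an op other than '+'/'*' (ValueError)
-- or a row shorter than ops (IndexError).
def Pre_solve_01 (numbers : List (List Int)) (ops : List String) : Prop :=
  (∀ op ∈ ops, op = "+" ∨ op = "*") ∧ (∀ row ∈ numbers, ops.length ≤ row.length)
instance (numbers : List (List Int)) (ops : List String) : Decidable (Pre_solve_01 numbers ops) := by unfold Pre_solve_01; infer_instance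

def pvWitness_solve_01 : List (List Int) × List String := ([[1, 2], [3, 4]], ["+", "*"])

def Spec_solve_01 (numbers : List (List Int)) (ops : List String) (out : Int) : Prop := out = solve_01_alt numbers ops
instance (numbers : List (List Int)) (ops : List String) (out : Int) : Decidable (Spec_solve_01 numbers ops out) := by unfold Spec_solve_01; infer_instance

-- ===== CLAIM (what is proved, stated in full; the proofs are below) =====
def Claim_equal_solve_01 : Prop := ∀ (numbers : List (List Int)) (ops : List String), Dom_solve_01 numbers ops → Pre_solve_01 numbers ops → Spec_solve_01 numbers ops (solve_01 numbers ops)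

-- ===== LEMMAS AND PROOFS =====

-- common reference value: per-column reduction
def colRed (numbers : List (List Int)) (ops : List String) (c : Nat) : Int :=
  if ops.getD c "" == "+" then numbers.foldl (fun s row => s + row.getD c 0) 0
  else numbers.foldl (fun m row => m * row.getD c 0) 1

theorem A_eq (numbers : List (List Int)) (ops : List String)
    (hops : ∀ op ∈ ops, op = "+" ∨ op = "*") :
    solve_01 numbers ops = ((List.range ops.length).map (colRed numbers ops)).sum := by
  unfold solve_01
  rw [PySem.List.foldl_congr_mem _ _
      (fun total c => total + (if PySem.List.pyGetD ops c "" == "+"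
        then numbers.foldl (fun s row => s + PySem.List.pyGetD row c 0) 0
        else numbers.foldl (fun m row => m * PySem.List.pyGetD row c 0) 1)) 0 ?_]
  · rw [PySem.List.foldl_add, PySem.List.pyRange_zero_nat, List.map_map]
    rw [zero_add]
    refine congrArg _ (List.map_congr_left ?_)
    intro k _
    simp only [Function.comp_apply, PySem.List.pyGetD_natCast, colRed]
  · intro acc c hc
    rw [PySem.List.mem_pyRange_one] at hc
    have hm : PySem.List.pyGetD ops c "" ∈ ops :=
      PySem.List.pyGetD_mem ops "" (by simp [PySem.Raise.InRange]; omega)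
    rw [PySem.List.foldl_pyRange_zero_pyGetD' numbers ([] : List Int)
        (fun s row => s + PySem.List.pyGetD row c 0) 0,
      PySem.List.foldl_pyRange_zero_pyGetD' numbers ([] : List Int)
        (fun m row => m * PySem.List.pyGetD row c 0) 1]
    rcases hops _ hm with h | h
    · simp [h]
    · simp [h]

theorem fold_rows (ops : List String) (numbers : List (List Int)) :
    ∀ (acc : List Int), (∀ row ∈ numbers, ops.length ≤ row.length) → acc.length = ops.length →
    numbers.foldl (fun acc row => (acc.zip (ops.zip row)).map
        (fun p => if p.2.1 == "+" then p.1 + p.2.2 else p.1 * p.2.2)) acc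
      = (List.range ops.length).map (fun c => numbers.foldl
          (fun a row => if ops.getD c "" == "+" then a + row.getD c 0 else a * row.getD c 0)
          (acc.getD c 0)) := by
  induction numbers with
  | nil =>
    intro acc h hlen
    simp only [List.foldl_nil]
    refine List.ext_getElem (by simp [hlen]) ?_
    intro i h1 h2
    simp only [List.getElem_map, List.getElem_range]
    rw [List.getD_eq_getElem acc 0 (by simpa [hlen] using h1)]
  | cons row rest ih =>
    intro acc h hlen
    have hrow : ops.length ≤ row.length := h row (List.mem_cons_self)
    have hlen' : ((acc.zip (ops.zip row)).map
        (fun p => if p.2.1 == "+" then p.1 + p.2.2 else p.1 * p.2.2)).length = ops.length := by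
      simp [hlen]; omega
    rw [List.foldl_cons, ih _ (fun r hr => h r (List.mem_cons_of_mem _ hr)) hlen']
    refine List.map_congr_left ?_
    intro c hc
    rw [List.mem_range] at hc
    rw [List.foldl_cons]
    congr 1
    rw [List.getD_eq_getElem _ 0 (by omega : c < ((acc.zip (ops.zip row)).map
        (fun p => if p.2.1 == "+" then p.1 + p.2.2 else p.1 * p.2.2)).length)]
    rw [List.getElem_map, List.getElem_zip, List.getElem_zip]
    rw [List.getD_eq_getElem acc 0 (by omega), List.getD_eq_getElem ops "" hc,
      List.getD_eq_getElem row 0 (by omega)]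

theorem B_eq (numbers : List (List Int)) (ops : List String)
    (hrows : ∀ row ∈ numbers, ops.length ≤ row.length) :
    solve_01_alt numbers ops = ((List.range ops.length).map (colRed numbers ops)).sum := by
  unfold solve_01_alt
  simp only [PySem.List.foldl_append_singleton_eq_map, List.nil_append]
  rw [fold_rows ops numbers _ hrows (by simp)]
  congr 1
  refine List.map_congr_left ?_
  intro c hc
  rw [List.mem_range] at hc
  have hinit : (ops.map (fun op => if op == "+" then (0 : Int) else 1)).getD c 0
      = if ops.getD c "" == "+" then (0 : Int) else 1 := by
    rw [List.getD_eq_getElem _ 0 (by simpa using hc), List.getElem_map,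
      List.getD_eq_getElem ops "" hc]
  rw [hinit]
  by_cases h : ops.getD c "" = "+"
  · simp only [colRed, h]; simp
  · have hb : (ops.getD c "" == "+") = false := by simpa using h
    simp only [colRed, hb]; simp

-- ===== VERDICT (by name: the statement is the Claim_ definition above) =====
theorem solve_01_spec : Claim_equal_solve_01 := by
  intro numbers ops _ hpre
  unfold Spec_solve_01
  rw [A_eq numbers ops hpre.1, B_eq numbers ops hpre.2]
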